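-- pv_equiv track=rewrite | github.com/NguyenChHieu/NXDOMAIN | NXDOMAIN/launcher.py | auth_file_data
-- ===== SOURCE A (Python) =====
-- def auth_file_data(tld_data, records):
--     auth_files = {}
--     all_dicts = []
--
--     # get auth domains from the previous tld_data
--     for tld_port, tld_dictionary in tld_data.items():
--         all_dicts.append(tld_dictionary)
--
--     # get the auth domain and ports
--     for dictionary in all_dicts:
--         for auth_domain, header_port in dictionary.items():
--             # deal with each "file" - directory separately
--             single_auth_file = {}
--             for full_domain, full_port in records.items():
--                 # distribute the full port into its file
--                 if full_domain.endswith(auth_domain):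
--                     if full_domain not in single_auth_file:
--                         single_auth_file[full_domain] = full_port
--
--                 auth_files[header_port] = single_auth_file
--
--     return auth_files
-- ===== SOURCE B (Python) =====
-- def auth_file_data(tld_data, records):
--     # Index every suffix of every record domain once, then answer each
--     # auth_domain by a single dict lookup instead of rescanning records.
--     by_suffix = {}
--     for full_domain, full_port in records.items():
--         for i in range(len(full_domain) + 1):
--             by_suffix.setdefault(full_domain[i:], {})[full_domain] = full_port
--
--     auth_files = {}
--     for dictionary in tld_data.values():
--         for auth_domain, header_port in dictionary.items():
--             auth_files[header_port] = by_suffix.get(auth_domain, {})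
--     return auth_files
-- ===== Notes on version B (the rewrite author's own statement) =====
-- stated objective: faster
-- what changed: B builds a suffix->matching-records hash index in one pass over the records (each record contributes all its suffixes), so every auth_domain is answered by a single dict lookup instead of rescanning all records with endswith for every auth_domain.
-- intended difference: When records is empty but some auth_domain exists, A returns {} because the assignment auth_files[header_port] = single_auth_file is accidentally indented inside the records loop and never runs; B returns each header_port mapped to an empty group, the intended grouping. — e.g. on auth_file_data([("c", [("com", 5)])], []): A returns [], B returns [(5, [])]
import Mathlib
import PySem

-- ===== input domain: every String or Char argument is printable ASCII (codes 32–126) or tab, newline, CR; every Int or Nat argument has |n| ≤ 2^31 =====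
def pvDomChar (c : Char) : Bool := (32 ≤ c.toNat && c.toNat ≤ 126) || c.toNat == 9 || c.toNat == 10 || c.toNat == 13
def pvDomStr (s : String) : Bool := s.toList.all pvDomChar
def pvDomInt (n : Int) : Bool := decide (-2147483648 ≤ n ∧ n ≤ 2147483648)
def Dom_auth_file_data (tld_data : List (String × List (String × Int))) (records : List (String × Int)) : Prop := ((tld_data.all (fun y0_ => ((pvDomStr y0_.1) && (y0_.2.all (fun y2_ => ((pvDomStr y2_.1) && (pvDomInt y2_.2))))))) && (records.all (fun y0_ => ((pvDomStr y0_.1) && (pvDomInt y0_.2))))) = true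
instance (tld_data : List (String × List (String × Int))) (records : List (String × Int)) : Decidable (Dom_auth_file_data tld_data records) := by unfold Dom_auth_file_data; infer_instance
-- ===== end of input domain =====

-- B replaces A's per-auth-domain rescan of all records with a suffix→records hash index built once.
-- Equivalence is about the RETURN value (neither program mutates its arguments).

-- ===== PORT A =====
-- the body of A's innermost 'for full_domain, full_port in records.items():' loop,
-- carrying the pair (auth_files, single_auth_file) as state
def pvASingleLoop (records : List (String × Int)) (ad : String) (hp : Int)
    (af : PySem.Dict Int (List (String × Int))) : PySem.Dict Int (List (String × Int)) :=
  (records.foldl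
    (fun (st : PySem.Dict Int (List (String × Int)) × PySem.Dict String Int) r =>
      let single :=
        if PySem.Str.endswith r.1 ad then
          (if st.2.contains r.1 then st.2 else st.2.insert r.1 r.2)
        else st.2
      (st.1.insert hp single.items, single))
    (af, PySem.Dict.empty)).1

def auth_file_data (tld_data : List (String × List (String × Int))) (records : List (String × Int)) : List (Int × List (String × Int)) :=
  let all_dicts : List (List (String × Int)) :=
    tld_data.foldl (fun acc p => acc ++ [p.2]) []
  let auth_files : PySem.Dict Int (List (String × Int)) :=
    all_dicts.foldl (fun af dictionary =>
      dictionary.foldl (fun af q => pvASingleLoop records q.1 q.2 af) af)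
      PySem.Dict.empty
  auth_files.items

-- ===== PORT B =====
-- 'for i in range(len(full_domain) + 1): by_suffix.setdefault(full_domain[i:], {})[full_domain] = full_port'
def pvSufStep (bs : PySem.Dict String (PySem.Dict String Int)) (r : String × Int) :
    PySem.Dict String (PySem.Dict String Int) :=
  (PySem.List.pyRange 0 ((PySem.Str.len r.1 : Int) + 1) 1).foldl
    (fun bs i =>
      let s := PySem.Str.slice r.1 (some i) none
      bs.insert s ((bs.getD s PySem.Dict.empty).insert r.1 r.2))
    bs

def pvSuffixIndex (records : List (String × Int)) : PySem.Dict String (PySem.Dict String Int) :=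
  records.foldl pvSufStep PySem.Dict.empty

def auth_file_data_alt (tld_data : List (String × List (String × Int))) (records : List (String × Int)) : List (Int × List (String × Int)) :=
  let by_suffix := pvSuffixIndex records
  let auth_files : PySem.Dict Int (List (String × Int)) :=
    tld_data.foldl (fun af p =>
      p.2.foldl (fun af q =>
        af.insert q.2 ((by_suffix.getD q.1 PySem.Dict.empty).items)) af)
      PySem.Dict.empty
  auth_files.items

-- ===== PRECONDITION & SPEC =====
-- Pre_ excludes only association lists whose record keys repeat: both dict-typed Python
-- parameters can never hold duplicate keys, so such lists encode no Python input at all.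
def Pre_auth_file_data (tld_data : List (String × List (String × Int))) (records : List (String × Int)) : Prop :=
  (records.map Prod.fst).Nodup
instance (tld_data : List (String × List (String × Int))) (records : List (String × Int)) : Decidable (Pre_auth_file_data tld_data records) := by unfold Pre_auth_file_data; infer_instance

def pvWitness_auth_file_data : (List (String × List (String × Int))) × (List (String × Int)) :=
  ([("x", [("om", 7)])], [("a.com", 1), ("b.org", 2)])

-- When records is empty but some auth_domain exists, A returns {} because the assignment
-- 'auth_files[header_port] = single_auth_file' is indented inside the records loop and never runs;
-- B returns each header_port mapped to its (empty) group of records, the intended grouping.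
def D_auth_file_data (tld_data : List (String × List (String × Int))) (records : List (String × Int)) : Prop :=
  records = [] ∧ ∃ p ∈ tld_data, p.2 ≠ []
instance (tld_data : List (String × List (String × Int))) (records : List (String × Int)) : Decidable (D_auth_file_data tld_data records) := by unfold D_auth_file_data; infer_instance

def Spec_auth_file_data (tld_data : List (String × List (String × Int))) (records : List (String × Int)) (out : List (Int × List (String × Int))) : Prop :=
  ¬ D_auth_file_data tld_data records → out = auth_file_data_alt tld_data records
instance (tld_data : List (String × List (String × Int))) (records : List (String × Int)) (out : List (Int × List (String × Int))) : Decidable (Spec_auth_file_data tld_data records out) := by unfold Spec_auth_file_data; infer_instance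

def pvDiffWitness_auth_file_data : (List (String × List (String × Int))) × (List (String × Int)) :=
  ([("c", [("com", 5)])], [])

def pvDiffWitnessOut_auth_file_data : (List (Int × List (String × Int))) × (List (Int × List (String × Int))) :=
  ([], [(5, [])])

-- ===== CLAIM (what is proved, stated in full; the proofs are below) =====
def Claim_unchanged_auth_file_data : Prop := ∀ (tld_data : List (String × List (String × Int))) (records : List (String × Int)), Dom_auth_file_data tld_data records → Pre_auth_file_data tld_data records → Spec_auth_file_data tld_data records (auth_file_data tld_data records)
def Claim_changed_auth_file_data : Prop := Dom_auth_file_data (pvDiffWitness_auth_file_data.1) (pvDiffWitness_auth_file_data.2) ∧ Pre_auth_file_data (pvDiffWitness_auth_file_data.1) (pvDiffWitness_auth_file_data.2) ∧ D_auth_file_data (pvDiffWitness_auth_file_data.1) (pvDiffWitness_auth_file_data.2) ∧ auth_file_data (pvDiffWitness_auth_file_data.1) (pvDiffWitness_auth_file_data.2) = pvDiffWitnessOut_auth_file_data.1 ∧ auth_file_data_alt (pvDiffWitness_auth_file_data.1) (pvDiffWitness_auth_file_data.2) = pvDiffWitnessOut_auth_file_data.2 ∧ pvDiffWitnessOut_auth_file_data.1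 ≠ pvDiffWitnessOut_auth_file_data.2
def Claim_exact_auth_file_data : Prop := ∀ (tld_data : List (String × List (String × Int))) (records : List (String × Int)), Dom_auth_file_data tld_data records → Pre_auth_file_data tld_data records → D_auth_file_data tld_data records → auth_file_data tld_data records ≠ auth_file_data_alt tld_data records

-- ===== LEMMAS AND PROOFS =====

-- the 'if fd not in single' first-wins update of A's single_auth_file
def pvFirstStep (ad : String) (s : PySem.Dict String Int) (r : String × Int) : PySem.Dict String Int :=
  if PySem.Str.endswith r.1 ad then (if s.contains r.1 then s else s.insert r.1 r.2) else s

-- the plain overwrite update (what B's bucket building does per matching record)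
def pvLastStep (ad : String) (s : PySem.Dict String Int) (r : String × Int) : PySem.Dict String Int :=
  if PySem.Str.endswith r.1 ad then s.insert r.1 r.2 else s

lemma pvA_inner (ad : String) (hp : Int) (l : List (String × Int)) (hl : l ≠ [])
    (af : PySem.Dict Int (List (String × Int))) (s : PySem.Dict String Int) :
    (l.foldl
      (fun (st : PySem.Dict Int (List (String × Int)) × PySem.Dict String Int) r =>
        let single :=
          if PySem.Str.endswith r.1 ad then
            (if st.2.contains r.1 then st.2 else st.2.insert r.1 r.2)
          else st.2
        (st.1.insert hp single.items, single))
      (af, s)).1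
    = af.insert hp (l.foldl (pvFirstStep ad) s).items := by
  induction l generalizing af s with
  | nil => exact absurd rfl hl
  | cons r t ih =>
    by_cases ht : t = []
    · subst ht; rfl
    · simp only [List.foldl_cons]
      rw [ih ht]
      rw [PySem.Dict.insert_insert_self]
      rfl

lemma pvFirst_eq_last (ad : String) (l : List (String × Int)) :
    ∀ s : PySem.Dict String Int, (l.map Prod.fst).Nodup →
    (∀ r ∈ l, s.contains r.1 = false) →
    l.foldl (pvFirstStep ad) s = l.foldl (pvLastStep ad) s := by
  induction l with
  | nil => intro s _ _; rfl
  | cons r t ih =>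
    intro s hnd hdisj
    simp only [List.map_cons, List.nodup_cons] at hnd
    have hc : s.contains r.1 = false := hdisj r (by simp)
    have hstep : pvFirstStep ad s r = pvLastStep ad s r := by
      simp [pvFirstStep, pvLastStep, hc]
    simp only [List.foldl_cons, hstep]
    refine ih _ hnd.2 ?_
    intro r' hr'
    have hne : r'.1 ≠ r.1 := by
      intro h
      exact hnd.1 (by rw [← h]; exact List.mem_map_of_mem hr')
    unfold pvLastStep
    split
    · rw [PySem.Dict.contains_insert]
      simp [hne, hdisj r' (List.mem_cons_of_mem r hr')]
    · exact hdisj r' (List.mem_cons_of_mem r hr')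

lemma pvIdx_fold (fd : String) (fp : Int) (ad : String) (L : List Nat) :
    ∀ bs : PySem.Dict String (PySem.Dict String Int),
    ((L.foldl (fun bs (i : Nat) =>
        let s := PySem.Str.slice fd (some (i : Int)) none
        bs.insert s ((bs.getD s PySem.Dict.empty).insert fd fp)) bs).getD ad PySem.Dict.empty)
    = if ∃ i ∈ L, PySem.Str.slice fd (some (i : Int)) none = ad
      then (bs.getD ad PySem.Dict.empty).insert fd fp
      else bs.getD ad PySem.Dict.empty := by
  induction L with
  | nil => intro bs; simp
  | cons i t ih =>
    intro bs
    simp only [List.foldl_cons]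
    rw [ih]
    by_cases hk : PySem.Str.slice fd (some (i : Int)) none = ad
    · have hbs' : ((bs.insert (PySem.Str.slice fd (some (i : Int)) none)
          ((bs.getD (PySem.Str.slice fd (some (i : Int)) none) PySem.Dict.empty).insert fd fp)).getD
            ad PySem.Dict.empty)
          = (bs.getD ad PySem.Dict.empty).insert fd fp := by
        rw [hk]; exact PySem.Dict.getD_insert_self _ _ _ _
      have hex : ∃ j ∈ i :: t, PySem.Str.slice fd (some (j : Int)) none = ad :=
        ⟨i, List.mem_cons_self, hk⟩
      rw [if_pos hex]
      split
      · rw [hbs', PySem.Dict.insert_insert_self]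
      · exact hbs'
    · have hbs' : ((bs.insert (PySem.Str.slice fd (some (i : Int)) none)
          ((bs.getD (PySem.Str.slice fd (some (i : Int)) none) PySem.Dict.empty).insert fd fp)).getD
            ad PySem.Dict.empty)
          = bs.getD ad PySem.Dict.empty :=
        PySem.Dict.getD_insert_of_ne _ _ _ (fun h => hk h.symm)
      rw [hbs']
      have hiff : (∃ j ∈ i :: t, PySem.Str.slice fd (some (j : Int)) none = ad)
          ↔ (∃ j ∈ t, PySem.Str.slice fd (some (j : Int)) none = ad) := by
        constructor
        · rintro ⟨j, hj, hja⟩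
          rcases List.mem_cons.mp hj with h | h
          · exact absurd (h ▸ hja) hk
          · exact ⟨j, h, hja⟩
        · rintro ⟨j, hj, hja⟩; exact ⟨j, List.mem_cons_of_mem i hj, hja⟩
      exact if_congr hiff.symm rfl rfl

lemma pvSuffix_iff (fd ad : String) :
    (∃ i ∈ List.range (fd.toList.length + 1), PySem.Str.slice fd (some (i : Int)) none = ad)
    ↔ PySem.Str.endswith fd ad = true := by
  have hkey : ∀ i : Nat, (PySem.Str.slice fd (some (i : Int)) none).toList = fd.toList.drop i := by
    intro i
    simp [PySem.Str.toList_slice, PySem.List.slice_from_natCast]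
  rw [show (PySem.Str.endswith fd ad = true) ↔ ad.toList <:+ fd.toList by
    simp [PySem.Str.endswith_eq, PySem.Chars.endswith_iff]]
  constructor
  · rintro ⟨i, _, hi⟩
    have : ad.toList = fd.toList.drop i := by rw [← hi, hkey]
    rw [this]
    exact List.drop_suffix i fd.toList
  · rintro ⟨t, ht⟩
    refine ⟨t.length, ?_, ?_⟩
    · have : t.length + ad.toList.length = fd.toList.length := by
        rw [← ht, List.length_append]
      exact List.mem_range.mpr (by omega)
    · apply String.toList_inj.mp
      rw [hkey, ← ht, List.drop_left]

lemma pvRec_step (r : String × Int) (ad : String)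
    (bs : PySem.Dict String (PySem.Dict String Int)) :
    (pvSufStep bs r).getD ad PySem.Dict.empty
    = if PySem.Str.endswith r.1 ad then (bs.getD ad PySem.Dict.empty).insert r.1 r.2
      else bs.getD ad PySem.Dict.empty := by
  unfold pvSufStep
  have hn : (PySem.Str.len r.1 : Int) + 1 = ((r.1.toList.length + 1 : Nat) : Int) := by
    simp [PySem.Str.len_eq]
  rw [hn, PySem.List.pyRange_zero_natCast, List.foldl_map, pvIdx_fold]
  exact if_congr (pvSuffix_iff r.1 ad) rfl rfl

lemma pvBucket (records : List (String × Int)) (ad : String) :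
    (pvSuffixIndex records).getD ad PySem.Dict.empty
      = records.foldl (pvLastStep ad) PySem.Dict.empty := by
  suffices h : ∀ bs, ((records.foldl pvSufStep bs).getD ad PySem.Dict.empty)
      = records.foldl (pvLastStep ad) (bs.getD ad PySem.Dict.empty) by
    have := h PySem.Dict.empty
    rw [pvSuffixIndex, this, PySem.Dict.getD_empty]
  induction records with
  | nil => intro bs; rfl
  | cons r t ih =>
    intro bs
    simp only [List.foldl_cons]
    rw [ih, pvRec_step]
    unfold pvLastStep
    split <;> rfl

-- a fold of the shape of both programs' outer loops is the identity when every inner dict is empty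
lemma pvEmptyAll {α β γ : Type} (l : List (α × List β)) (h : ∀ p ∈ l, p.2 = [])
    (g : γ → β → γ) (af : γ) :
    l.foldl (fun af p => p.2.foldl g af) af = af := by
  induction l generalizing af with
  | nil => rfl
  | cons p t ih =>
    simp only [List.foldl_cons]
    rw [h p (by simp)]
    exact ih (fun q hq => h q (List.mem_cons_of_mem p hq)) af

lemma pvMain (tld_data : List (String × List (String × Int))) (records : List (String × Int))
    (hrec : records ≠ []) (hnd : (records.map Prod.fst).Nodup) :
    auth_file_data tld_data records = auth_file_data_alt tld_data records := by
  simp only [auth_file_data, auth_file_data_alt]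
  have hmap : tld_data.foldl (fun acc p => acc ++ [p.2]) [] = tld_data.map Prod.snd := by
    simpa using PySem.List.foldl_append_singleton_eq_map Prod.snd tld_data []
  rw [hmap, List.foldl_map]
  have hstep : ∀ (af : PySem.Dict Int (List (String × Int))) (q : String × Int),
      pvASingleLoop records q.1 q.2 af
      = af.insert q.2 (((pvSuffixIndex records).getD q.1 PySem.Dict.empty).items) := by
    intro af q
    rw [pvASingleLoop, pvA_inner q.1 q.2 records hrec,
        pvFirst_eq_last q.1 records PySem.Dict.empty hnd
          (fun r _ => PySem.Dict.contains_empty r.1),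
        ← pvBucket]
  simp only [hstep]

lemma pvInsert_items_ne_nil {κ ν : Type} [BEq κ] [LawfulBEq κ]
    (d : PySem.Dict κ ν) (k : κ) (v : ν) : (d.insert k v).items ≠ [] := by
  intro h
  have : (d.insert k v).contains k = true := PySem.Dict.contains_insert_self d k v
  rw [PySem.Dict.contains_iff_mem_keys] at this
  have hk : (d.insert k v).keys = [] := by
    simp only [PySem.Dict.keys, h, List.map_nil]
  rw [hk] at this
  exact absurd this (List.not_mem_nil)

-- once nonempty, the dicts built by B's assembling folds stay nonempty
lemma pvInner_ne_nil (l : List (String × Int)) (f : String → List (String × Int))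
    (af : PySem.Dict Int (List (String × Int))) (h : af.items ≠ [] ∨ l ≠ []) :
    (l.foldl (fun af q => af.insert q.2 (f q.1)) af).items ≠ [] := by
  induction l generalizing af with
  | nil => simpa using h
  | cons q t ih =>
    simp only [List.foldl_cons]
    exact ih _ (Or.inl (pvInsert_items_ne_nil _ _ _))

lemma pvOuter_ne_nil (tld : List (String × List (String × Int)))
    (f : String → List (String × Int)) (af : PySem.Dict Int (List (String × Int)))
    (h : af.items ≠ [] ∨ ∃ p ∈ tld, p.2 ≠ []) :
    (tld.foldl (fun af p => p.2.foldl (fun af q => af.insert q.2 (f q.1)) af) af).items ≠ [] := by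
  induction tld generalizing af with
  | nil => simpa using h
  | cons p t ih =>
    simp only [List.foldl_cons]
    rcases h with h | h
    · exact ih _ (Or.inl (pvInner_ne_nil p.2 f af (Or.inl h)))
    · rcases h with ⟨p', hp', hne⟩
      rcases List.mem_cons.mp hp' with rfl | hp'
      · exact ih _ (Or.inl (pvInner_ne_nil p'.2 f af (Or.inr hne)))
      · by_cases haf : (p.2.foldl (fun af q => af.insert q.2 (f q.1)) af).items = []
        · exact ih _ (Or.inr ⟨p', hp', hne⟩)
        · exact ih _ (Or.inl haf)

-- ===== VERDICT (by name: the statement is the Claim_ definition above) =====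
theorem auth_file_data_spec : Claim_unchanged_auth_file_data := by
  intro tld_data records _ hpre hD
  by_cases hrec : records = []
  · subst hrec
    have hall : ∀ p ∈ tld_data, p.2 = ([] : List (String × Int)) := by
      intro p hp
      by_contra hne
      exact hD ⟨rfl, p, hp, hne⟩
    simp only [auth_file_data, auth_file_data_alt]
    have hmap : tld_data.foldl (fun acc p => acc ++ [p.2]) [] = tld_data.map Prod.snd := by
      simpa using PySem.List.foldl_append_singleton_eq_map Prod.snd tld_data []
    rw [hmap, List.foldl_map, pvEmptyAll tld_data hall, pvEmptyAll tld_data hall]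
  · exact pvMain tld_data records hrec hpre

theorem auth_file_data_changed : Claim_changed_auth_file_data := by
  unfold Claim_changed_auth_file_data; decide

theorem auth_file_data_tight : Claim_exact_auth_file_data := by
  intro tld_data records _ _ hD
  rcases hD with ⟨hrec, hex⟩
  subst hrec
  intro heq
  have hA : auth_file_data tld_data [] = [] := by
    simp only [auth_file_data]
    have hmap : tld_data.foldl (fun acc p => acc ++ [p.2]) [] = tld_data.map Prod.snd := by
      simpa using PySem.List.foldl_append_singleton_eq_map Prod.snd tld_data []
    rw [hmap, List.foldl_map]
    have hid : ∀ (af : PySem.Dict Int (List (String × Int))) (q : String × Int),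
        pvASingleLoop ([] : List (String × Int)) q.1 q.2 af = af := fun _ _ => rfl
    simp only [hid]
    simp only [List.foldl_fixed]
    rfl
  have hB : auth_file_data_alt tld_data [] ≠ [] := by
    simp only [auth_file_data_alt]
    exact pvOuter_ne_nil tld_data
      (fun ad => ((pvSuffixIndex []).getD ad PySem.Dict.empty).items) PySem.Dict.empty
      (Or.inr hex)
  rw [hA] at heq
  exact hB heq.symm
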